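-- pv_equiv track=rewrite | github.com/raeez/chiral-bar-cobar | compute/lib/stable_graph_enumeration.py | _edge_automorphism_factor
-- ===== SOURCE A (Python) =====
-- from typing import Dict, List, Tuple, Optional, Set
-- from math import factorial
-- from collections import Counter
--
-- def _edge_automorphism_factor(edges: Tuple[Tuple[int, int], ...],
--                               vertex_perm: Tuple[int, ...]) -> int:
--     """Count edge-level automorphisms compatible with a vertex permutation.
--
--     Given that vertex_perm maps the edge multiset to itself, count the number
--     of ways to match the mapped edges to the original edges, including:
--       - Permutations of parallel edges between the same vertex pair
--       - Self-loop half-edge flips (each self-loop contributes a factor of 2)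
--     """
--     # Normalize edges under the vertex permutation
--     mapped = []
--     for v1, v2 in edges:
--         a, b = vertex_perm[v1], vertex_perm[v2]
--         mapped.append((min(a, b), max(a, b)))
--
--     # Group original edges by their (v1, v2) pair
--     original_groups: Dict[Tuple[int, int], int] = Counter(edges)
--     mapped_groups: Dict[Tuple[int, int], int] = Counter(mapped)
--
--     # The mapped groups must equal the original groups (already checked by caller)
--     if original_groups != mapped_groups:
--         return 0
--
--     # For each edge group, the mapped edges must be matched to original edges.
--     # For a group of k parallel edges between (a, b):
--     #   - k! permutations of the edges
--     #   - If a == b (self-loops), each loop can also be flipped: 2^k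
--     factor = 1
--     for (a, b), k in original_groups.items():
--         # The vertex perm maps this group to itself (since mapped_groups == original_groups).
--         # We need to find how many ways the k mapped edges can be assigned to the k
--         # original edges. This depends on whether the vertex perm fixes or swaps a and b.
--         #
--         # If vertex_perm maps (a,b) to (a,b) [same pair], then any permutation
--         # of the k edges works: k! ways.
--         # The flip factor for self-loops is independent.
--         factor *= factorial(k)
--         if a == b:
--             factor *= (2 ** k)
--
--     return factor
-- ===== SOURCE B (Python) =====
-- from math import factorial
--
-- def _edge_automorphism_factor(edges, vertex_perm):
--     # Sort-and-compare instead of hash counting: the sorted normalized mapped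
--     # list must equal the sorted original edge list; then one run-length scan
--     # over the sorted originals multiplies in factorial(k) (and 2**k for loops).
--     mapped = sorted(
--         (vertex_perm[v1], vertex_perm[v2]) if vertex_perm[v1] <= vertex_perm[v2]
--         else (vertex_perm[v2], vertex_perm[v1])
--         for v1, v2 in edges)
--     orig = sorted(edges)
--     if mapped != orig:
--         return 0
--     factor = 1
--     while orig:
--         e = orig[0]
--         k = 1
--         while k < len(orig) and orig[k] == e:
--             k += 1
--         factor *= factorial(k)
--         if e[0] == e[1]:
--             factor *= 2 ** k
--         orig = orig[k:]
--     return factor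
-- ===== Notes on version B (the rewrite author's own statement) =====
-- stated objective: alternative
-- what changed: Replaces the two Counter hash maps and dict-equality test by sorting both the normalized mapped list and the original edge list, comparing the sorted lists, and computing the factor by a single run-length scan over the sorted originals instead of iterating dict items.
import Mathlib
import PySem

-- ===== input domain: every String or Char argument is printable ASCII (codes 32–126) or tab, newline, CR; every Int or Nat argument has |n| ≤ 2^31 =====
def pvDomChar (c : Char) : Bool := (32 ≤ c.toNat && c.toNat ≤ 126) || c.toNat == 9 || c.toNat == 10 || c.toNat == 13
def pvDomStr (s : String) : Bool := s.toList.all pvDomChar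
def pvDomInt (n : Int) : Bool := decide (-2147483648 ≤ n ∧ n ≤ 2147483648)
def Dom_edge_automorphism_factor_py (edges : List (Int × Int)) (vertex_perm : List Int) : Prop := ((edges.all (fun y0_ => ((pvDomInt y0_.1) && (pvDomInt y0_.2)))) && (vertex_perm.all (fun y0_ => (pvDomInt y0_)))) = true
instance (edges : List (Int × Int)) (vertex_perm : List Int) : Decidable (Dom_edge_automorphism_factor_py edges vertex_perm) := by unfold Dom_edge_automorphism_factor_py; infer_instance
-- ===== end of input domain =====

-- B replaces A's Counter hash maps and dict comparison by sorting both lists (Python tuple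
-- order = lexicographic), comparing sorted lists, and a single run-length scan over the sorted
-- originals (objective: alternative, not faster).

-- ===== PORT A =====
-- Python dict `==` ignores insertion order: equal sizes and every key of d1 mapped to the
-- same value by d2 (exact for dicts, whose keys are unique).
def pvDictEq (d1 d2 : PySem.Dict (Int × Int) Int) : Bool :=
  d1.size == d2.size && d1.items.all (fun kv => d2.contains kv.1 && d2.getD kv.1 0 == kv.2)

def edge_automorphism_factor_py (edges : List (Int × Int)) (vertex_perm : List Int) : Int :=
  -- mapped.append((min(a,b), max(a,b))) with a = vertex_perm[v1], b = vertex_perm[v2]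
  let mapped := edges.foldl (fun acc e =>
    let a := PySem.List.pyGetD vertex_perm e.1 0
    let b := PySem.List.pyGetD vertex_perm e.2 0
    acc ++ [(min a b, max a b)]) []
  let original_groups := PySem.Dict.counter edges
  let mapped_groups := PySem.Dict.counter mapped
  if !(pvDictEq original_groups mapped_groups) then 0
  else
    -- counter values are positive counts, so `.toNat` is exact for factorial(k) and 2**k
    original_groups.items.foldl (fun factor kv =>
      let factor := factor * (Nat.factorial kv.2.toNat : Int)
      if kv.1.1 == kv.1.2 then factor * 2 ^ kv.2.toNat else factor) 1

-- ===== PORT B =====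
-- Python compares tuples lexicographically; sorted(list of pairs) is sorting by the lex key.
def pvKey (p : Int × Int) : Int ×ₗ Int := toLex p

-- 'while orig: e = orig[0]; k = 1; while k < len(orig) and orig[k] == e: k += 1; …; orig = orig[k:]'
-- (the inner while counts the run of e at the front: takeWhile on orig[1:]; orig[k:] drops it)
def pvRunScan : List (Int × Int) → Int → Int
  | [], factor => factor
  | e :: rest, factor =>
    let k := (rest.takeWhile (fun x => x == e)).length + 1
    let f1 := factor * (Nat.factorial k : Int)
    let f2 := if e.1 == e.2 then f1 * 2 ^ k else f1
    pvRunScan (rest.dropWhile (fun x => x == e)) f2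
  termination_by l _ => l.length
  decreasing_by exact Nat.lt_succ_of_le (List.dropWhile_sublist _).length_le

def edge_automorphism_factor_py_alt (edges : List (Int × Int)) (vertex_perm : List Int) : Int :=
  let mapped := PySem.List.sorted (edges.map (fun e =>
    let a := PySem.List.pyGetD vertex_perm e.1 0
    let b := PySem.List.pyGetD vertex_perm e.2 0
    if a ≤ b then (a, b) else (b, a))) pvKey false
  let orig := PySem.List.sorted edges pvKey false
  if mapped ≠ orig then 0
  else pvRunScan orig 1

-- ===== PRECONDITION & SPEC =====
-- Pre_ excludes exactly the inputs where A raises IndexError: an edge endpoint that is not a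
-- valid (possibly negative) Python index into vertex_perm.
def Pre_edge_automorphism_factor_py (edges : List (Int × Int)) (vertex_perm : List Int) : Prop :=
  ∀ e ∈ edges, PySem.Raise.InRange vertex_perm.length e.1 ∧ PySem.Raise.InRange vertex_perm.length e.2
instance (edges : List (Int × Int)) (vertex_perm : List Int) : Decidable (Pre_edge_automorphism_factor_py edges vertex_perm) := by unfold Pre_edge_automorphism_factor_py; infer_instance

def pvWitness_edge_automorphism_factor_py : (List (Int × Int)) × List Int := ([(0, 0), (0, 1)], [0, 1])

def Spec_edge_automorphism_factor_py (edges : List (Int × Int)) (vertex_perm : List Int) (out : Int) : Prop := out = edge_automorphism_factor_py_alt edges vertex_perm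
instance (edges : List (Int × Int)) (vertex_perm : List Int) (out : Int) : Decidable (Spec_edge_automorphism_factor_py edges vertex_perm out) := by unfold Spec_edge_automorphism_factor_py; infer_instance

-- ===== CLAIM (what is proved, stated in full; the proofs are below) =====
def Claim_equal_edge_automorphism_factor_py : Prop := ∀ (edges : List (Int × Int)) (vertex_perm : List Int), Dom_edge_automorphism_factor_py edges vertex_perm → Pre_edge_automorphism_factor_py edges vertex_perm → Spec_edge_automorphism_factor_py edges vertex_perm (edge_automorphism_factor_py edges vertex_perm)

-- ===== LEMMAS AND PROOFS =====

-- the per-group factor: factorial(k), times 2^k for self-loops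
def pvG (k : Int × Int) (n : Nat) : Int :=
  (Nat.factorial n : Int) * (if k.1 == k.2 then 2 ^ n else 1)

-- in a key-sorted list e :: rest, no copy of e survives past the front run
theorem pvNotMemDrop (e : Int × Int) (rest : List (Int × Int))
    (hp : (e :: rest).Pairwise (fun a b => pvKey a ≤ pvKey b)) :
    e ∉ rest.dropWhile (fun x => x == e) := by
  intro he
  cases hdw : rest.dropWhile (fun x => x == e) with
  | nil => rw [hdw] at he; simp at he
  | cons x t =>
    have hxne : (x == e) = false := by
      have h0 := List.head?_dropWhile_not (fun y => y == e) rest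
      rw [hdw] at h0
      simpa using h0
    rw [hdw] at he
    have hsplit : rest = rest.takeWhile (fun y => y == e) ++ x :: t := by
      rw [← hdw, List.takeWhile_append_dropWhile]
    rcases List.mem_cons.1 he with h1 | h2
    · rw [← h1] at hxne; simp at hxne
    · have hxrest : x ∈ rest := by rw [hsplit]; simp
      have h_ex : pvKey e ≤ pvKey x := (List.rel_of_pairwise_cons hp) hxrest
      have hp_rest : (rest.takeWhile (fun y => y == e) ++ x :: t).Pairwise
          (fun a b => pvKey a ≤ pvKey b) := by
        rw [← hsplit]; exact hp.of_cons
      have h_xe : pvKey x ≤ pvKey e :=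
        (List.rel_of_pairwise_cons (List.pairwise_append.1 hp_rest).2.1) h2
      rw [toLex.injective (le_antisymm h_xe h_ex)] at hxne
      simp at hxne

-- A's items loop as a product over the listed keys
theorem pvFoldl_eq_prod (l : List (Int × Int)) (cnt : (Int × Int) → Nat) (f : Int) :
    l.foldl (fun acc k =>
        if (k.1 == k.2) = true then acc * (Nat.factorial (cnt k) : Int) * 2 ^ (cnt k)
        else acc * (Nat.factorial (cnt k) : Int)) f
      = f * (l.map (fun k => pvG k (cnt k))).prod := by
  induction l generalizing f with
  | nil => simp
  | cons e t ih =>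
    simp only [List.foldl_cons, List.map_cons, List.prod_cons, ih, pvG]
    split_ifs <;> ring

-- B's run-length scan over a key-sorted list: the product of pvG over the distinct
-- elements with their multiplicities
theorem pvRunScan_eq_aux : ∀ (n : Nat) (l : List (Int × Int)), l.length ≤ n →
    l.Pairwise (fun a b => pvKey a ≤ pvKey b) → ∀ f,
    pvRunScan l f = f * ((PySem.List.dedup l).map (fun k => pvG k (l.count k))).prod := by
  intro n
  induction n with
  | zero =>
    intro l hl _ f
    obtain rfl : l = [] := List.eq_nil_of_length_eq_zero (Nat.le_zero.1 hl)
    simp [pvRunScan.eq_1]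
  | succ n ihn =>
    intro l hl hp f
    match l with
    | [] => simp [pvRunScan.eq_1]
    | e :: rest =>
      set run := rest.takeWhile (fun x => x == e) with hrun
      set rest' := rest.dropWhile (fun x => x == e) with hrest'
      have hsplit : rest = run ++ rest' := (List.takeWhile_append_dropWhile).symm
      have hrun_all : ∀ x ∈ run, x = e := by
        intro x hx
        have := List.mem_takeWhile_imp hx
        simpa using this
      -- e does not occur in rest'
      have hnot : e ∉ rest' := by
        rw [hrest']
        exact pvNotMemDrop e rest hp
      have hcount_run : run.count e = run.length := by
        rw [List.count_eq_length]
        intro x hx; simpa using (hrun_all x hx).symm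
      have hcnt_e : (e :: rest).count e = run.length + 1 := by
        rw [List.count_cons_self, hsplit, List.count_append,
          List.count_eq_zero_of_not_mem hnot, hcount_run]
      have hcnt_ne : ∀ k, k ≠ e → (e :: rest).count k = rest'.count k := by
        intro k hk
        have hkrun : k ∉ run := fun hkr => hk (hrun_all k hkr)
        rw [List.count_cons_of_ne (Ne.symm hk), hsplit, List.count_append,
          List.count_eq_zero_of_not_mem hkrun, Nat.zero_add]
      -- dedup (e :: rest) is a permutation of e :: dedup rest'
      have hperm : (PySem.List.dedup (e :: rest)).Perm (e :: PySem.List.dedup rest') := by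
        rw [PySem.List.dedup_eq_ofList, PySem.List.dedup_eq_ofList]
        refine (List.perm_ext_iff_of_nodup (PySem.Set.nodup_ofList _) ?_).2 ?_
        · exact List.nodup_cons.2 ⟨by simp [PySem.Set.mem_ofList, hnot], PySem.Set.nodup_ofList _⟩
        · intro a
          simp only [PySem.Set.mem_ofList, List.mem_cons, hsplit, List.mem_append]
          constructor
          · rintro (rfl | ha | ha)
            · exact Or.inl rfl
            · exact Or.inl (hrun_all a ha)
            · exact Or.inr ha
          · rintro (rfl | ha)
            · exact Or.inl rfl
            · exact Or.inr (Or.inr ha)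
      have hlen' : rest'.length ≤ n :=
        le_trans (List.dropWhile_sublist _).length_le (Nat.le_of_succ_le_succ hl)
      have hp' : rest'.Pairwise (fun a b => pvKey a ≤ pvKey b) :=
        hp.of_cons.sublist (List.dropWhile_sublist _)
      rw [pvRunScan.eq_2, ← hrun, ← hrest', ihn rest' hlen' hp']
      have hcnt' : ∀ k ∈ PySem.List.dedup rest',
          pvG k (rest'.count k) = pvG k ((e :: rest).count k) := by
        intro k hk
        rw [PySem.List.dedup_eq_ofList, PySem.Set.mem_ofList] at hk
        have hke : k ≠ e := fun h => hnot (h ▸ hk)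
        rw [hcnt_ne k hke]
      rw [(hperm.map _).prod_eq, List.map_cons, List.prod_cons, List.map_congr_left hcnt']
      rw [hcnt_e]
      simp only [pvG]
      split_ifs <;> ring

theorem pvRunScan_eq (l : List (Int × Int))
    (hp : l.Pairwise (fun a b => pvKey a ≤ pvKey b)) (f : Int) :
    pvRunScan l f = f * ((PySem.List.dedup l).map (fun k => pvG k (l.count k))).prod :=
  pvRunScan_eq_aux l.length l le_rfl hp f

-- A's Counter comparison is multiset equality
theorem pvDictEq_iff (xs ys : List (Int × Int)) :
    pvDictEq (PySem.Dict.counter xs) (PySem.Dict.counter ys) = true ↔ xs.Perm ys := by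
  have hsize : ∀ zs : List (Int × Int), (PySem.Dict.counter zs).size = (PySem.Set.ofList zs).length := by
    intro zs
    simp [PySem.Dict.size, PySem.Dict.items_counter]
  constructor
  · rintro h
    rw [pvDictEq, Bool.and_eq_true] at h
    obtain ⟨h1, h2⟩ := h
    rw [beq_iff_eq, hsize, hsize] at h1
    rw [List.all_eq_true] at h2
    have hkey : ∀ k ∈ xs, k ∈ ys ∧ ys.count k = xs.count k := by
      intro k hk
      have h3 := h2 (k, (xs.count k : Int)) (by
        rw [PySem.Dict.items_counter]
        exact List.mem_map.2 ⟨k, (PySem.Set.mem_ofList _ _).2 hk, rfl⟩)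
      rw [Bool.and_eq_true] at h3
      obtain ⟨hc, hv⟩ := h3
      rw [PySem.Dict.contains_counter] at hc
      rw [PySem.Dict.getD_counter] at hv
      have hv' : (ys.count k : Int) = (xs.count k : Int) := by simpa using hv
      exact ⟨by simpa using hc, by exact_mod_cast hv'⟩
    have hsub : PySem.Set.ofList xs ⊆ PySem.Set.ofList ys := by
      intro a ha
      rw [PySem.Set.mem_ofList] at ha ⊢
      exact (hkey a ha).1
    have hp : (PySem.Set.ofList xs).Perm (PySem.Set.ofList ys) :=
      (List.subperm_of_subset (PySem.Set.nodup_ofList _) hsub).perm_of_length_le (le_of_eq h1.symm)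
    rw [List.perm_iff_count]
    intro a
    by_cases ha : a ∈ xs
    · exact ((hkey a ha).2).symm
    · rw [List.count_eq_zero_of_not_mem ha, Eq.comm, List.count_eq_zero]
      intro hay
      exact ha ((PySem.Set.mem_ofList xs a).1 (hp.mem_iff.2 ((PySem.Set.mem_ofList ys a).2 hay)))
  · intro hp
    rw [pvDictEq, Bool.and_eq_true]
    constructor
    · rw [beq_iff_eq, hsize, hsize]
      have hq : (PySem.Set.ofList xs).Perm (PySem.Set.ofList ys) := by
        refine (List.perm_ext_iff_of_nodup (PySem.Set.nodup_ofList _) (PySem.Set.nodup_ofList _)).2 ?_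
        intro a; rw [PySem.Set.mem_ofList, PySem.Set.mem_ofList]; exact hp.mem_iff
      exact hq.length_eq
    · rw [List.all_eq_true]
      intro kv hkv
      rw [PySem.Dict.items_counter, List.mem_map] at hkv
      obtain ⟨a, ha, heq⟩ := hkv
      subst heq
      rw [Bool.and_eq_true, PySem.Dict.contains_counter, PySem.Dict.getD_counter]
      rw [PySem.Set.mem_ofList] at ha
      refine ⟨by simpa using hp.mem_iff.1 ha, ?_⟩
      show ((ys.count a : Int) == (xs.count a : Int)) = true
      rw [beq_iff_eq, hp.count_eq]

-- the normalized mapped lists of the two ports coincide (if a ≤ b then (a,b) else (b,a) = (min,max))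
theorem pvMapped_eq (edges : List (Int × Int)) (vp : List Int) :
    edges.map (fun e =>
        let a := PySem.List.pyGetD vp e.1 0
        let b := PySem.List.pyGetD vp e.2 0
        if a ≤ b then (a, b) else (b, a))
      = edges.map (fun e =>
        (min (PySem.List.pyGetD vp e.1 0) (PySem.List.pyGetD vp e.2 0),
         max (PySem.List.pyGetD vp e.1 0) (PySem.List.pyGetD vp e.2 0))) := by
  refine List.map_congr_left fun e _ => ?_
  simp only [min_def, max_def]
  split_ifs <;> simp_all

-- products of pvG over the distinct elements agree for permuted lists
theorem pvProd_perm (xs ys : List (Int × Int)) (h : xs.Perm ys) :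
    ((PySem.List.dedup xs).map (fun k => pvG k (xs.count k))).prod
      = ((PySem.List.dedup ys).map (fun k => pvG k (ys.count k))).prod := by
  have hd : (PySem.List.dedup xs).Perm (PySem.List.dedup ys) := by
    rw [PySem.List.dedup_eq_ofList, PySem.List.dedup_eq_ofList]
    refine (List.perm_ext_iff_of_nodup (PySem.Set.nodup_ofList _) (PySem.Set.nodup_ofList _)).2 ?_
    intro a; rw [PySem.Set.mem_ofList, PySem.Set.mem_ofList]; exact h.mem_iff
  calc ((PySem.List.dedup xs).map (fun k => pvG k (xs.count k))).prod
      = ((PySem.List.dedup xs).map (fun k => pvG k (ys.count k))).prod := by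
        refine congrArg _ (List.map_congr_left fun k _ => ?_); rw [h.count_eq]
    _ = ((PySem.List.dedup ys).map (fun k => pvG k (ys.count k))).prod := (hd.map _).prod_eq

-- ===== VERDICT (by name: the statement is the Claim_ definition above) =====
theorem edge_automorphism_factor_py_spec : Claim_equal_edge_automorphism_factor_py := by
  intro edges vp _hdom _hpre
  unfold Spec_edge_automorphism_factor_py
  simp only [edge_automorphism_factor_py, edge_automorphism_factor_py_alt]
  rw [PySem.List.foldl_append_singleton_eq_map, List.nil_append, pvMapped_eq]
  set m := edges.map (fun e =>
    (min (PySem.List.pyGetD vp e.1 0) (PySem.List.pyGetD vp e.2 0),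
     max (PySem.List.pyGetD vp e.1 0) (PySem.List.pyGetD vp e.2 0))) with hm
  -- the two zero-tests agree: both decide whether edges and m carry the same multiset
  have hiff : pvDictEq (PySem.Dict.counter edges) (PySem.Dict.counter m) = true
      ↔ ¬(PySem.List.sorted m pvKey false ≠ PySem.List.sorted edges pvKey false) := by
    rw [pvDictEq_iff, not_ne_iff]
    constructor
    · intro h
      exact PySem.List.sorted_eq_sorted_of_perm m edges pvKey toLex.injective h.symm
    · intro h
      exact (PySem.List.sorted_perm edges pvKey false).symm.trans
        (h ▸ PySem.List.sorted_perm m pvKey false)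
  by_cases hc : pvDictEq (PySem.Dict.counter edges) (PySem.Dict.counter m) = true
  · rw [hc, if_neg (by simp), if_neg (hiff.1 hc)]
    rw [pvRunScan_eq _ (PySem.List.sorted_pairwise edges pvKey)]
    rw [PySem.Dict.items_counter, List.foldl_map]
    simp only [Int.toNat_natCast]
    rw [pvFoldl_eq_prod (PySem.Set.ofList edges) (fun k => edges.count k) 1]
    rw [← PySem.List.dedup_eq_ofList]
    exact congrArg _ (pvProd_perm edges _ (PySem.List.sorted_perm edges pvKey false).symm)
  · rw [Bool.not_eq_true] at hc
    rw [hc, if_pos (by simp), if_pos ?_]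
    rw [← Bool.not_eq_true, hiff] at hc
    exact not_not.1 hc
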